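-- pv_equiv track=rewrite | github.com/Olegas/advent-of-code-2024 | day22.py | pattern_and_price
-- ===== SOURCE A (Python) =====
-- def pattern_and_price(n):
--     pattern = tuple()
--     for itm in n:
--         price, delta = itm
--         l = len(pattern)
--         if l < 4:
--             pattern = pattern + (delta,)
--         if l == 3:
--             yield pattern, price
--             pattern = pattern[1:4]
-- ===== SOURCE B (Python) =====
-- def pattern_and_price(n):
--     items = list(n)
--     deltas = [d for _, d in items]
--     prices = [p for p, _ in items]
--     yield from zip(zip(deltas, deltas[1:], deltas[2:], deltas[3:]), prices[3:])
-- ===== Notes on version B (the rewrite author's own statement) =====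
-- stated objective: simpler
-- what changed: Replaces the streaming rolling-tuple state machine (l<4 append / l==3 yield+shift) with a single zip of four shifted delta slices against the prices shifted by three.
import Mathlib
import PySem

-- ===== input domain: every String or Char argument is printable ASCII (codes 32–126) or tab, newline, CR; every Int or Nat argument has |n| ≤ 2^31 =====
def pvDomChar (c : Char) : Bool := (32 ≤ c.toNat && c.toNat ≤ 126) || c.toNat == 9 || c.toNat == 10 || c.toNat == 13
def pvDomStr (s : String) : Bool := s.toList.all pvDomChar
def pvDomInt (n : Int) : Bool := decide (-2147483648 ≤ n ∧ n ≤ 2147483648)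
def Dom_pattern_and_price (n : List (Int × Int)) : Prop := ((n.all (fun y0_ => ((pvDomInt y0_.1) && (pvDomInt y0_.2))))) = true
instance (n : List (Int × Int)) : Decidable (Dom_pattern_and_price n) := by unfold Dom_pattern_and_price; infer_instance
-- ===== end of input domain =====

-- B replaces A's streaming rolling-tuple state machine with a zip of four shifted delta
-- slices against the prices shifted by three (objective: simpler). Equivalence is about
-- the yielded sequence on finite inputs (both Pythons are generators).

-- ===== PORT A =====
-- one step of A's loop body over state (pattern, yielded-so-far)
def pvStepA (st : List Int × List ((Int × Int × Int × Int) × Int)) (itm : Int × Int) :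
    List Int × List ((Int × Int × Int × Int) × Int) :=
  let price := itm.1
  let delta := itm.2
  let l := (st.1).length
  let pattern := if l < 4 then st.1 ++ [delta] else st.1
  if l == 3 then
    -- yield pattern, price  (pattern has exactly 4 components here); then pattern = pattern[1:4]
    match pattern with
    | [a, b, c, d] => (PySem.List.slice pattern (some 1) (some 4), st.2 ++ [((a, b, c, d), price)])
    | _ => (PySem.List.slice pattern (some 1) (some 4), st.2)
  else (pattern, st.2)

def pattern_and_price (n : List (Int × Int)) : List ((Int × Int × Int × Int) × Int) :=
  (n.foldl pvStepA ([], [])).2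

-- ===== PORT B =====
def pattern_and_price_alt (n : List (Int × Int)) : List ((Int × Int × Int × Int) × Int) :=
  let items := n
  let deltas := items.map (fun x => x.2)
  let prices := items.map (fun x => x.1)
  (List.zip (List.zip (List.zip (List.zip deltas (PySem.List.slice deltas (some 1) none))
      (PySem.List.slice deltas (some 2) none)) (PySem.List.slice deltas (some 3) none))
      (PySem.List.slice prices (some 3) none)).map
    (fun x => ((x.1.1.1.1, x.1.1.1.2, x.1.1.2, x.1.2), x.2))

-- ===== PRECONDITION & SPEC =====
def Spec_pattern_and_price (n : List (Int × Int)) (out : List ((Int × Int × Int × Int) × Int)) : Prop := out = pattern_and_price_alt n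
instance (n : List (Int × Int)) (out : List ((Int × Int × Int × Int) × Int)) : Decidable (Spec_pattern_and_price n out) := by unfold Spec_pattern_and_price; infer_instance

-- ===== CLAIM (what is proved, stated in full; the proofs are below) =====
def Claim_equal_pattern_and_price : Prop := ∀ (n : List (Int × Int)), Dom_pattern_and_price n → Spec_pattern_and_price n (pattern_and_price n)

-- ===== LEMMAS AND PROOFS =====

-- reference: windows of four consecutive deltas with the price of the fourth item
def pvRefGo (a b c : Int) : List (Int × Int) → List ((Int × Int × Int × Int) × Int)
  | [] => []
  | (p, d) :: rest => ((a, b, c, d), p) :: pvRefGo b c d rest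

theorem pvSlice14 (a b c d : Int) :
    PySem.List.slice [a, b, c, d] (some 1) (some 4) = [b, c, d] := by
  simp [PySem.List.slice, PySem.List.clampIdx]

theorem pvLoopA (rest : List (Int × Int)) :
    ∀ (a b c : Int) (acc : List ((Int × Int × Int × Int) × Int)),
      (rest.foldl pvStepA ([a, b, c], acc)).2 = acc ++ pvRefGo a b c rest := by
  induction rest with
  | nil => intro a b c acc; simp [pvRefGo]
  | cons x t ih =>
    intro a b c acc
    obtain ⟨p, d⟩ := x
    simp only [List.foldl_cons, pvStepA]
    simp only [List.length_cons, List.length_nil]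
    norm_num
    rw [pvSlice14, ih, pvRefGo]
    simp

theorem pvZipB (rest : List (Int × Int)) :
    ∀ (a b c : Int),
      (List.zip (List.zip (List.zip (List.zip (a :: b :: c :: rest.map (fun x => x.2))
          (b :: c :: rest.map (fun x => x.2))) (c :: rest.map (fun x => x.2)))
          (rest.map (fun x => x.2))) (rest.map (fun x => x.1))).map
        (fun x => ((x.1.1.1.1, x.1.1.1.2, x.1.1.2, x.1.2), x.2)) = pvRefGo a b c rest := by
  induction rest with
  | nil => intro a b c; simp [pvRefGo]
  | cons x t ih =>
    intro a b c
    obtain ⟨p, d⟩ := x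
    have h := ih b c d
    simp only [List.map_cons, List.zip_cons_cons] at h ⊢
    rw [pvRefGo, ← h]

-- ===== VERDICT (by name: the statement is the Claim_ definition above) =====
theorem pattern_and_price_spec : Claim_equal_pattern_and_price := by
  intro n _
  unfold Spec_pattern_and_price pattern_and_price pattern_and_price_alt
  match n with
  | [] => decide
  | [x] => simp [pvStepA, PySem.List.slice]
  | [x, y] => simp [pvStepA, PySem.List.slice]
  | x :: y :: z :: rest =>
    show (rest.foldl pvStepA ([x.2, y.2, z.2], [])).2 = _
    rw [pvLoopA]
    simp only [List.map_cons, List.nil_append,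
      PySem.List.slice_from_one, List.tail_cons]
    rw [show ((2:Int) = ((2:Nat):Int)) from rfl, show ((3:Int) = ((3:Nat):Int)) from rfl,
      PySem.List.slice_from_natCast, PySem.List.slice_from_natCast, PySem.List.slice_from_natCast]
    simp only [List.drop_succ_cons, List.drop_zero]
    rw [pvZipB]
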